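-- pv_equiv track=rewrite | github.com/rlawlsdn263/algorithm | 프로그래머스/1/76501. 음양 더하기/음양 더하기.py | solution
-- ===== SOURCE A (Python) =====
-- def solution(absolutes, signs):
--     count = 0
--
--     for i in list(zip(absolutes, signs)):
--         if i[1] == False:
--             count -=  i[0]
--         else:
--             count +=  i[0]
--
--     return count
-- ===== SOURCE B (Python) =====
-- def solution(absolutes, signs):
--     pairs = list(zip(absolutes, signs))
--     total = sum(a for a, _ in pairs)
--     neg = sum(a for a, s in pairs if s == False)
--     return total - 2 * neg
-- ===== Notes on version B (the rewrite author's own statement) =====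
-- stated objective: alternative
-- what changed: Replaces the branchy signed accumulation with two unconditional sums over the zipped pairs: gross total minus twice the sum of the negative entries.
import Mathlib
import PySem

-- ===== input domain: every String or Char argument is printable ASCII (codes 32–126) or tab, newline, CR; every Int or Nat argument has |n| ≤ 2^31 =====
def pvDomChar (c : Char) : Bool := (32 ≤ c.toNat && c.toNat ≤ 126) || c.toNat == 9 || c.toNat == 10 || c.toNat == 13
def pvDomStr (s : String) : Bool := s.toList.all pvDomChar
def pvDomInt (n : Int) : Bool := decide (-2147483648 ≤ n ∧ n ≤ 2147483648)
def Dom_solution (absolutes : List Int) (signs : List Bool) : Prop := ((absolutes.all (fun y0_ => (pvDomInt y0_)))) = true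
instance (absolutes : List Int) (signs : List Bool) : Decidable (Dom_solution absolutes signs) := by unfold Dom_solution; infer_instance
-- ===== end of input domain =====

-- B replaces A's branchy signed accumulation with two unconditional sums over the zipped
-- pairs (gross total minus twice the negatives) — an alternative decomposition, same cost.

-- ===== PORT A =====
def solution (absolutes : List Int) (signs : List Bool) : Int :=
  (absolutes.zip signs).foldl (fun count i => if i.2 == false then count - i.1 else count + i.1) 0

-- ===== PORT B =====
-- B: gross sum of the zipped pairs minus twice the sum of the negatively-signed entries.
def solution_alt (absolutes : List Int) (signs : List Bool) : Int :=
  let pairs := absolutes.zip signs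
  let total := (pairs.map (fun p => p.1)).sum
  let neg := ((pairs.filter (fun p => p.2 == false)).map (fun p => p.1)).sum
  total - 2 * neg

-- ===== PRECONDITION & SPEC =====
def Spec_solution (absolutes : List Int) (signs : List Bool) (out : Int) : Prop := out = solution_alt absolutes signs
instance (absolutes : List Int) (signs : List Bool) (out : Int) : Decidable (Spec_solution absolutes signs out) := by unfold Spec_solution; infer_instance

-- ===== CLAIM (what is proved, stated in full; the proofs are below) =====
def Claim_equal_solution : Prop := ∀ (absolutes : List Int) (signs : List Bool), Dom_solution absolutes signs → Spec_solution absolutes signs (solution absolutes signs)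

-- ===== LEMMAS AND PROOFS =====

-- ===== VERDICT (by name: the statement is the Claim_ definition above) =====
theorem solution_go (l : List (Int × Bool)) (c : Int) :
    l.foldl (fun count i => if i.2 == false then count - i.1 else count + i.1) c
      = c + (l.map (fun p => p.1)).sum
          - 2 * ((l.filter (fun p => p.2 == false)).map (fun p => p.1)).sum := by
  induction l generalizing c with
  | nil => simp
  | cons h tl ih =>
    obtain ⟨a, s⟩ := h
    cases s <;> simp only [List.foldl_cons] <;> rw [ih] <;>
      simp <;> ring

theorem solution_spec : Claim_equal_solution := by
  intro absolutes signs _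
  unfold Spec_solution solution solution_alt
  simp only [solution_go]
  ring
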